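-- pv_equiv track=rewrite | github.com/streamlit/st-issues | app/spec_renderer.py | extract_title_and_content
-- ===== SOURCE A (Python) =====
-- def extract_title_and_content(markdown_content: str) -> tuple[str | None, str]:
--     """Extract the first heading as title and return remaining content."""
--     lines = markdown_content.split("\n")
--     title = None
--     content_lines = []
--     title_found = False
--
--     for line in lines:
--         if not title_found and line.strip().startswith("# "):
--             title = line.strip()[2:].strip()  # Remove '# ' and whitespace
--             title_found = True
--         elif title_found:
--             content_lines.append(line)
--         else:
--             content_lines.append(line)
--
--     remaining_content = "\n".join(content_lines)
--     return title, remaining_content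
-- ===== SOURCE B (Python) =====
-- def extract_title_and_content(markdown_content: str) -> tuple[str | None, str]:
--     """Extract the first heading as title and return remaining content."""
--     lines = markdown_content.split("\n")
--     for i, line in enumerate(lines):
--         stripped = line.strip()
--         if stripped.startswith("# "):
--             return stripped[2:].strip(), "\n".join(lines[:i] + lines[i + 1:])
--     return None, "\n".join(lines)
-- ===== Notes on version B (the rewrite author's own statement) =====
-- stated objective: simpler
-- what changed: B finds the first heading line with an enumerate scan and early return, building the content by slicing the line list around that index, instead of A's per-line accumulator list with a title_found flag.
import Mathlib
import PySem

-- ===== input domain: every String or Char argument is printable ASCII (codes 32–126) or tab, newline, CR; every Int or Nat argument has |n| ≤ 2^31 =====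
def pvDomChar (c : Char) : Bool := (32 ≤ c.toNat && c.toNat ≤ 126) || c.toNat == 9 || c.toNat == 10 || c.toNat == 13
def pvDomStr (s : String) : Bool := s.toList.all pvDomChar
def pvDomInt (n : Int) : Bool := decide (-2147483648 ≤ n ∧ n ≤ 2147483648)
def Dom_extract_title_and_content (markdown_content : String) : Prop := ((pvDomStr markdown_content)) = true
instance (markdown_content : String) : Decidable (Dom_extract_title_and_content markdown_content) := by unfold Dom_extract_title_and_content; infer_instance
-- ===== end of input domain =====

-- B replaces A's per-line accumulator with a find-first-heading-index scan that slices the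
-- line list around the heading; objective: simpler.


-- ===== PORT A =====
-- loop body of A's for-loop; state = (title, content_lines, title_found)
def aBody (st : Option String × List String × Bool) (line : String) : Option String × List String × Bool :=
  if !st.2.2 && PySem.Str.startswith (PySem.Str.strip line) "# " then
    (some (PySem.Str.strip (PySem.Str.slice (PySem.Str.strip line) (some 2) none)), st.2.1, true)
  else if st.2.2 then
    (st.1, st.2.1 ++ [line], st.2.2)
  else
    (st.1, st.2.1 ++ [line], st.2.2)

def extract_title_and_content (markdown_content : String) : Option String × String :=
  let lines := (PySem.Str.split? markdown_content "\n").getD []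
  let st := lines.foldl aBody (none, [], false)
  (st.1, PySem.Str.join "\n" st.2.1)

-- ===== PORT B =====
-- B's enumerate loop: scan for the first heading, then slice `all` around index i
def altFind (lines : List String) (all : List String) (i : Nat) : Option String × String :=
  match lines with
  | [] => (none, PySem.Str.join "\n" all)
  | line :: rest =>
    let stripped := PySem.Str.strip line
    if PySem.Str.startswith stripped "# " then
      (some (PySem.Str.strip (PySem.Str.slice stripped (some 2) none)),
       PySem.Str.join "\n"
         (PySem.List.slice all none (some (i : Int)) ++ PySem.List.slice all (some ((i : Int) + 1)) none))
    else altFind rest all (i + 1)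

def extract_title_and_content_alt (markdown_content : String) : Option String × String :=
  let lines := (PySem.Str.split? markdown_content "\n").getD []
  altFind lines lines 0

-- ===== PRECONDITION & SPEC =====
def Spec_extract_title_and_content (markdown_content : String) (out : Option String × String) : Prop := out = extract_title_and_content_alt markdown_content
instance (markdown_content : String) (out : Option String × String) : Decidable (Spec_extract_title_and_content markdown_content out) := by unfold Spec_extract_title_and_content; infer_instance

-- ===== CLAIM (what is proved, stated in full; the proofs are below) =====
def Claim_equal_extract_title_and_content : Prop := ∀ (markdown_content : String), Dom_extract_title_and_content markdown_content → Spec_extract_title_and_content markdown_content (extract_title_and_content markdown_content)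

-- ===== LEMMAS AND PROOFS =====

-- once the title is found, A's loop only appends the remaining lines
theorem foldl_aBody_found (rest : List String) (t : String) (acc : List String) :
    rest.foldl aBody (some t, acc, true) = (some t, acc ++ rest, true) := by
  induction rest generalizing acc with
  | nil => simp
  | cons line rest ih => simp [aBody, ih]

theorem altFind_eq (rest pre : List String) :
    (let st := rest.foldl aBody (none, pre, false); (st.1, PySem.Str.join "\n" st.2.1))
      = altFind rest (pre ++ rest) pre.length := by
  induction rest generalizing pre with
  | nil => simp [altFind]
  | cons line rest ih =>
    by_cases h : PySem.Str.startswith (PySem.Str.strip line) "# " = true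
    · have hd : (pre ++ line :: rest).drop (pre.length + 1) = rest := by
        have : pre ++ line :: rest = (pre ++ [line]) ++ rest := by simp
        rw [this]
        have hl : (pre ++ [line]).length = pre.length + 1 := by simp
        rw [← hl, List.drop_left]
      simp only [List.foldl_cons, aBody, h, Bool.not_false, Bool.true_and, if_pos,
        foldl_aBody_found, altFind, PySem.List.slice_to_natCast]
      have hc : ((pre.length : Int) + 1) = ((pre.length + 1 : Nat) : Int) := by push_cast; ring
      rw [hc, PySem.List.slice_from_natCast, hd, List.take_left]
    · have hb : aBody (none, pre, false) line = (none, pre ++ [line], false) := by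
        simp only [Bool.not_eq_true, PySem.Str.startswith_eq, PySem.Str.toList_strip,
          show ("# ".toList) = ['#', ' '] from rfl] at h
        simp [aBody, h]
      simp only [List.foldl_cons, hb, altFind, h, if_neg, Bool.false_eq_true, not_false_iff]
      have := ih (pre ++ [line])
      simpa using this

-- ===== VERDICT (by name: the statement is the Claim_ definition above) =====
theorem extract_title_and_content_spec : Claim_equal_extract_title_and_content := by
  intro s _
  unfold Spec_extract_title_and_content extract_title_and_content extract_title_and_content_alt
  simpa using altFind_eq ((PySem.Str.split? s "\n").getD []) []
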